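-- pv_equiv track=rewrite | github.com/allencho-svc/goldprice | web/main.py | _daily_latest
-- ===== SOURCE A (Python) =====
-- def _daily_latest(rows: list[dict]) -> list[dict]:
--     """캘린더 일자별로, 해당 일의 마지막 고시 시각 행만 사용."""
--     by_day: dict[str, dict] = {}
--     for row in rows:
--         dt = row.get("date") or ""
--         if len(dt) < 10:
--             continue
--         day = dt[:10]
--         cur = by_day.get(day)
--         if cur is None or dt > (cur.get("date") or ""):
--             by_day[day] = row
--     out = []
--     for day in sorted(by_day.keys()):
--         r = by_day[day]
--         out.append(
--             {
--                 "date": day,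
--                 "s_pure": r.get("s_pure"),
--                 "p_pure": r.get("p_pure"),
--                 "p_18k": r.get("p_18k"),
--                 "p_14k": r.get("p_14k"),
--             }
--         )
--     return out
-- ===== SOURCE B (Python) =====
-- def _best_for(day, qual):
--     """Linear scan for the given day's latest-timestamp row (first one among ties)."""
--     best = None
--     for r in qual:
--         dt = r.get("date") or ""
--         if dt[:10] == day and (best is None or dt > (best.get("date") or "")):
--             best = r
--     return best
--
--
-- def _daily_latest(rows: list[dict]) -> list[dict]:
--     """No dict: collect the distinct calendar days, then scan qual once per day."""
--     qual = [r for r in rows if len(r.get("date") or "") >= 10]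
--     return [
--         {
--             "date": day,
--             "s_pure": b.get("s_pure"),
--             "p_pure": b.get("p_pure"),
--             "p_18k": b.get("p_18k"),
--             "p_14k": b.get("p_14k"),
--         }
--         for day, b in ((d, _best_for(d, qual)) for d in sorted({(r.get("date") or "")[:10] for r in qual}))
--     ]
-- ===== Notes on version B (the rewrite author's own statement) =====
-- stated objective: alternative
-- what changed: A maintains a per-day running-max dict in one pass; B uses no dict at all: it filters the qualifying rows, collects the distinct calendar days as a set, and for each sorted day re-scans the filtered list to pick that day's latest row (nested scans instead of a keyed accumulator).
import Mathlib
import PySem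

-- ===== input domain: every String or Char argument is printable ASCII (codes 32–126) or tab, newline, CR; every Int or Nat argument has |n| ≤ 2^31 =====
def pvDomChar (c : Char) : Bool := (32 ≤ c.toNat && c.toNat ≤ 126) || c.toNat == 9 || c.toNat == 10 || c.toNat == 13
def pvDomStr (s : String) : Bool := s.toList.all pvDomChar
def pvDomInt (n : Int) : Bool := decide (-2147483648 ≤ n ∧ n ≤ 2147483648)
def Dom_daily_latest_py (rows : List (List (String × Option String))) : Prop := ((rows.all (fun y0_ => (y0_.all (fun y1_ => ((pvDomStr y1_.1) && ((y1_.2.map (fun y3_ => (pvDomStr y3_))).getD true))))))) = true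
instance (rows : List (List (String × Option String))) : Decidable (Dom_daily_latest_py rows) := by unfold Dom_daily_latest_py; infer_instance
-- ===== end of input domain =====

-- B replaces A's per-day running-max dict by a dict-free nested scan: filter the qualifying
-- rows, collect the distinct calendar days, and re-scan the filtered list once per sorted day
-- (alternative decomposition; not claimed faster).

-- shared helpers: row.get(k) (None if key missing or value None), row.get("date") or "", dt[:10]
def pvGetRow (r : List (String × Option String)) (k : String) : Option String :=
  ((PySem.Dict.mk r).get? k).join

def pvDt (r : List (String × Option String)) : String := (pvGetRow r "date").getD ""

def pvDay (r : List (String × Option String)) : String := PySem.Str.slice (pvDt r) none (some 10)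

-- the projected output row {"date": day, "s_pure": …, …} (identical dict literal in A and B)
def pvProj (day : String) (r : List (String × Option String)) : List (String × Option String) :=
  [("date", some day), ("s_pure", pvGetRow r "s_pure"), ("p_pure", pvGetRow r "p_pure"),
   ("p_18k", pvGetRow r "p_18k"), ("p_14k", pvGetRow r "p_14k")]

-- ===== PORT A =====
-- one iteration of A's loop: keep the latest (strictly greater timestamp) row per day
def pvStepA (d : PySem.Dict String (List (String × Option String)))
    (row : List (String × Option String)) : PySem.Dict String (List (String × Option String)) :=
  if PySem.Str.len (pvDt row) < 10 then d
  else
    match d.get? (pvDay row) with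
    | none => d.insert (pvDay row) row
    | some cur => if pvDt cur < pvDt row then d.insert (pvDay row) row else d

def daily_latest_py (rows : List (List (String × Option String))) : List (List (String × Option String)) :=
  let byDay := rows.foldl pvStepA PySem.Dict.empty
  (PySem.List.sorted byDay.keys (fun k => k) false).foldl
    (fun out day =>
      out ++ [match byDay.get? day with   -- by_day[day]: the key is always present
              | some r => pvProj day r
              | none => []]) []

-- ===== PORT B =====
-- _best_for(day, qual): linear scan; keep r when dt[:10]==day and (best is None or dt > best's dt)
def pvBestFor (day : String) (qual : List (List (String × Option String))) :
    Option (List (String × Option String)) :=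
  qual.foldl
    (fun best r =>
      if pvDay r = day then
        match best with
        | none => some r
        | some m => if pvDt m < pvDt r then some r else some m
      else best) none

def daily_latest_py_alt (rows : List (List (String × Option String))) : List (List (String × Option String)) :=
  let qual := rows.filter (fun r => decide (10 ≤ PySem.Str.len (pvDt r)))
  (PySem.List.sorted (PySem.Set.ofList (qual.map pvDay)) (fun k => k) false).map
    (fun day =>
      match pvBestFor day qual with   -- b.get(…): b is never None for a day of the set
      | some b => pvProj day b
      | none => [])

-- ===== PRECONDITION & SPEC =====
def Spec_daily_latest_py (rows : List (List (String × Option String))) (out : List (List (String × Option String))) : Prop := out = daily_latest_py_alt rows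
instance (rows : List (List (String × Option String))) (out : List (List (String × Option String))) : Decidable (Spec_daily_latest_py rows out) := by unfold Spec_daily_latest_py; infer_instance

-- ===== CLAIM (what is proved, stated in full; the proofs are below) =====
def Claim_equal_daily_latest_py : Prop := ∀ (rows : List (List (String × Option String))), Dom_daily_latest_py rows → Spec_daily_latest_py rows (daily_latest_py rows)

-- ===== LEMMAS AND PROOFS =====

-- the qualifying rows of day `k`
def pvRowsFor (k : String) (rows : List (List (String × Option String))) : List (List (String × Option String)) :=
  (rows.filter (fun r => decide (10 ≤ PySem.Str.len (pvDt r)))).filter (fun r => pvDay r == k)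

-- A's dict after the loop, observed at key k, is the running strict-max over exactly that day's rows
theorem pvFoldA_get? (rows : List (List (String × Option String)))
    (d0 : PySem.Dict String (List (String × Option String))) (k : String) :
    (rows.foldl pvStepA d0).get? k =
      (pvRowsFor k rows).foldl
        (fun acc r => match acc with
          | none => some r
          | some m => if pvDt m < pvDt r then some r else some m)
        (d0.get? k) := by
  induction rows generalizing d0 with
  | nil => rfl
  | cons r t ih =>
    rw [List.foldl_cons]
    by_cases hlen : PySem.Str.len (pvDt r) < 10
    · have hd : (decide (10 ≤ PySem.Str.len (pvDt r))) = false := decide_eq_false (by omega)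
      have h1 : pvStepA d0 r = d0 := by unfold pvStepA; rw [if_pos hlen]
      have h2 : pvRowsFor k (r :: t) = pvRowsFor k t := by
        unfold pvRowsFor; rw [List.filter_cons, hd]; simp
      rw [h1, h2, ih]
    · have hd : (decide (10 ≤ PySem.Str.len (pvDt r))) = true := decide_eq_true (by omega)
      by_cases hk : pvDay r = k
      · have h2 : pvRowsFor k (r :: t) = r :: pvRowsFor k t := by
          unfold pvRowsFor
          rw [List.filter_cons, hd, if_pos rfl, List.filter_cons,
            show (pvDay r == k) = true from beq_iff_eq.mpr hk, if_pos rfl]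
        have h1 : (pvStepA d0 r).get? k =
            (match d0.get? k with
              | none => some r
              | some m => if pvDt m < pvDt r then some r else some m) := by
          subst hk
          unfold pvStepA
          rw [if_neg hlen]
          split
          next hget => rw [PySem.Dict.get?_insert_self]
          next cur hget =>
            by_cases hc : pvDt cur < pvDt r
            · rw [if_pos hc, if_pos hc, PySem.Dict.get?_insert_self]
            · rw [if_neg hc, if_neg hc]; exact hget
        rw [h2, List.foldl_cons, ih, h1]
      · have hne : k ≠ pvDay r := fun h => hk h.symm
        have h2 : pvRowsFor k (r :: t) = pvRowsFor k t := by
          unfold pvRowsFor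
          rw [List.filter_cons, hd, if_pos rfl, List.filter_cons,
            show (pvDay r == k) = false from beq_eq_false_iff_ne.mpr hk, if_neg (by simp)]
        have h1 : (pvStepA d0 r).get? k = d0.get? k := by
          unfold pvStepA
          rw [if_neg hlen]
          split
          next hget => rw [PySem.Dict.get?_insert, if_neg hne]
          next cur hget =>
            by_cases hc : pvDt cur < pvDt r
            · rw [if_pos hc, PySem.Dict.get?_insert, if_neg hne]
            · rw [if_neg hc]
        rw [h2, ih, h1]

-- one loop step of A, seen on the key list: add the day to the set if the row qualifies
theorem pvStepA_keys (d : PySem.Dict String (List (String × Option String)))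
    (r : List (String × Option String)) :
    (pvStepA d r).keys =
      if 10 ≤ PySem.Str.len (pvDt r) then PySem.Set.add d.keys (pvDay r) else d.keys := by
  unfold pvStepA
  by_cases hlen : PySem.Str.len (pvDt r) < 10
  · rw [if_pos hlen, if_neg (by omega)]
  · rw [if_neg hlen, if_pos (by omega)]
    split
    next hget =>
      have hnc : d.contains (pvDay r) = false := (PySem.Dict.get?_eq_none_iff_contains d _).mp hget
      have hnm : pvDay r ∉ d.keys := (PySem.Dict.get?_eq_none_iff_not_mem_keys d _).mp hget
      rw [PySem.Dict.keys_insert_of_not_contains d _ hnc]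
      unfold PySem.Set.add PySem.Set.contains
      rw [if_neg (by simpa using hnm)]
    next cur hget =>
      have hc : d.contains (pvDay r) = true := by
        rw [PySem.Dict.contains_eq_isSome_get?, hget]; rfl
      have hm : pvDay r ∈ d.keys := by
        by_contra hnm
        rw [(PySem.Dict.get?_eq_none_iff_not_mem_keys d _).mpr hnm] at hget
        simp at hget
      have hadd : PySem.Set.add d.keys (pvDay r) = d.keys := by
        unfold PySem.Set.add PySem.Set.contains
        rw [if_pos (by simpa using hm)]
      by_cases hcmp : pvDt cur < pvDt r
      · rw [if_pos hcmp, PySem.Dict.keys_insert_of_contains d _ hc, hadd]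
      · rw [if_neg hcmp, hadd]

-- A's key list is exactly set(day(r) for qualifying r), first occurrences in order
theorem pvFoldA_keys (rows : List (List (String × Option String)))
    (d0 : PySem.Dict String (List (String × Option String))) :
    (rows.foldl pvStepA d0).keys =
      ((rows.filter (fun r => decide (10 ≤ PySem.Str.len (pvDt r)))).map pvDay).foldl
        PySem.Set.add d0.keys := by
  induction rows generalizing d0 with
  | nil => rfl
  | cons r t ih =>
    rw [List.foldl_cons, List.filter_cons]
    by_cases hge : 10 ≤ PySem.Str.len (pvDt r)
    · rw [if_pos (decide_eq_true hge), List.map_cons, List.foldl_cons, ih,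
        pvStepA_keys, if_pos hge]
    · rw [if_neg (by simpa using hge), ih, pvStepA_keys, if_neg hge]

-- B's inner scan over qual, restricted to day k, is the same running strict-max fold
theorem pvBestFor_eq (rows : List (List (String × Option String))) (k : String) :
    pvBestFor k (rows.filter (fun r => decide (10 ≤ PySem.Str.len (pvDt r)))) =
      (pvRowsFor k rows).foldl
        (fun acc r => match acc with
          | none => some r
          | some m => if pvDt m < pvDt r then some r else some m)
        none := by
  unfold pvBestFor pvRowsFor
  rw [PySem.List.foldl_ite_eq_foldl_filter (p := fun r => pvDay r = k)]
  congr 1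

-- ===== VERDICT (by name: the statement is the Claim_ definition above) =====
theorem daily_latest_py_spec : Claim_equal_daily_latest_py := by
  intro rows _
  unfold Spec_daily_latest_py daily_latest_py daily_latest_py_alt
  dsimp only
  simp only [PySem.List.foldl_append_singleton_eq_map, List.nil_append]
  have hkeys : (rows.foldl pvStepA PySem.Dict.empty).keys =
      PySem.Set.ofList ((rows.filter (fun r => decide (10 ≤ PySem.Str.len (pvDt r)))).map pvDay) := by
    rw [pvFoldA_keys, PySem.Set.ofList_eq_foldl]
    rfl
  rw [hkeys]
  refine List.map_congr_left ?_
  intro day _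
  rw [pvFoldA_get? rows PySem.Dict.empty day, PySem.Dict.get?_empty, ← pvBestFor_eq]
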